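-- pv_equiv track=rewrite | github.com/jaakkopee/gematreeac | gemGramSyllables.py | buildGematriaDictionary
-- ===== SOURCE A (Python) =====
-- def calculateGematria(word, cipher="English extended"):
--     # Dictionary of letter to numerical value mappings
--     if cipher == "English extended":
--         values = {
--             'a': 1, 'b': 2, 'c': 3, 'd': 4, 'e': 5, 'f': 6, 'g': 7, 'h': 8,
--             'i': 9, 'j': 10, 'k': 20, 'l': 30, 'm': 40, 'n': 50, 'o': 60,
--             'p': 70, 'q': 80, 'r': 90, 's': 100, 't': 200, 'u': 300, 'v': 400,
--             'w': 500, 'x': 600, 'y': 700, 'z': 800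
--         }
--     else:
--         # Add other ciphers here as necessary
--         raise ValueError("Unsupported cipher")
--
--     # Calculate the gematria value by summing the values of each letter
--     value = 0
--     for letter in word:
--         value += values.get(letter.lower(), 0)
--
--     return value
--
-- def buildGematriaDictionary(syllablelist):
--     gematria_dict = {}
--     for syllable in syllablelist:
--         syllable = syllable.lower()
--         gematria = calculateGematria(syllable)
--         if gematria in gematria_dict:
--                 gematria_dict[gematria].append(syllable)
--         else:
--             gematria_dict[gematria] = [syllable]
--
--     return gematria_dict
-- ===== SOURCE B (Python) =====
-- def buildGematriaDictionary(syllablelist):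
--     # closed-form letter values (no table): a..i = 1..9, j..r = 10..90, s..z = 100..800
--     def val(c):
--         i = ord(c) - 97
--         if 0 <= i < 26:
--             return (i % 9 + 1) * 10 ** (i // 9)
--         return 0
--     pairs = [(sum(val(c) for c in s), s) for s in (w.lower() for w in syllablelist)]
--     keys = list(dict.fromkeys(v for v, _ in pairs))
--     return {k: [s for v, s in pairs if v == k] for k in keys}
-- ===== Notes on version B (the rewrite author's own statement) =====
-- stated objective: alternative
-- what changed: A looks each letter up in a 26-entry dict and buckets syllables incrementally with a contains-then-append/insert branch; B computes letter values by a closed-form arithmetic formula (no table) in one flat (value, syllable) pass, dedups the values in first-occurrence order, and builds each group by filtering that list per distinct value.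
import Mathlib
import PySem

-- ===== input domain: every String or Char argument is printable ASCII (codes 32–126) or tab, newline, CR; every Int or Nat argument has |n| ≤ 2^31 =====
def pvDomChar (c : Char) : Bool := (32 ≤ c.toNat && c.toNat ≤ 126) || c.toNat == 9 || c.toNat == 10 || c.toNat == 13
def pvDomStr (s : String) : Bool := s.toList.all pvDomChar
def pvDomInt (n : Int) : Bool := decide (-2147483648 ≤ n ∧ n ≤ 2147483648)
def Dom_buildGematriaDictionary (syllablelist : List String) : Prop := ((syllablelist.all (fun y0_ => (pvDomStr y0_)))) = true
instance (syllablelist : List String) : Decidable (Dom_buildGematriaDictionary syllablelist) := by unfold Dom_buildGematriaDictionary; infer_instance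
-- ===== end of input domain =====

-- B replaces A's dict letter-table and incremental bucketing by a closed-form letter-value
-- formula, a flat (value, syllable) pass, an ordered dedup of the values, and one filter per
-- distinct value (alternative decomposition, same results).


-- ===== PORT A =====
def pvGemValuesA : PySem.Dict Char Int := PySem.Dict.ofList
  [('a',1),('b',2),('c',3),('d',4),('e',5),('f',6),('g',7),('h',8),
   ('i',9),('j',10),('k',20),('l',30),('m',40),('n',50),('o',60),
   ('p',70),('q',80),('r',90),('s',100),('t',200),('u',300),('v',400),
   ('w',500),('x',600),('y',700),('z',800)]

-- Python raises ValueError on a non-default cipher; buildGematriaDictionary only ever passes the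
-- default, so the (unreachable here) raising branch is ported as 0.
def calculateGematria (word : String) (cipher : String) : Int :=
  if cipher == "English extended" then
    word.toList.foldl (fun value letter => value + pvGemValuesA.getD (PySem.Chars.lowerChar letter) 0) 0
  else 0

def buildGematriaDictionary (syllablelist : List String) : List (Int × List String) :=
  (syllablelist.foldl (fun gematria_dict syllable0 =>
      let syllable := PySem.Str.lower syllable0
      let gematria := calculateGematria syllable "English extended"
      if gematria_dict.contains gematria then
        gematria_dict.modify gematria [] (fun l => l ++ [syllable])
      else
        gematria_dict.insert gematria [syllable])
    PySem.Dict.empty).items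

-- ===== PORT B =====
-- closed-form letter value: a..i = 1..9, j..r = 10..90, s..z = 100..800, else 0
def pvVal (c : Char) : Int :=
  let i : Int := (c.toNat : Int) - 97
  if 0 ≤ i ∧ i < 26 then (PySem.Int.mod i 9 + 1) * 10 ^ (PySem.Int.floordiv i 9).toNat
  else 0

def buildGematriaDictionary_alt (syllablelist : List String) : List (Int × List String) :=
  let pairs := (syllablelist.map PySem.Str.lower).map
      (fun s => ((s.toList.map pvVal).sum, s))
  let keys := PySem.List.dedup (pairs.map (fun p => p.1))
  keys.map (fun k => (k, (pairs.filter (fun p => p.1 == k)).map (fun p => p.2)))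

-- ===== PRECONDITION & SPEC =====
def Spec_buildGematriaDictionary (syllablelist : List String) (out : List (Int × List String)) : Prop := out = buildGematriaDictionary_alt syllablelist
instance (syllablelist : List String) (out : List (Int × List String)) : Decidable (Spec_buildGematriaDictionary syllablelist out) := by unfold Spec_buildGematriaDictionary; infer_instance

-- ===== CLAIM (what is proved, stated in full; the proofs are below) =====
def Claim_equal_buildGematriaDictionary : Prop := ∀ (syllablelist : List String), Dom_buildGematriaDictionary syllablelist → Spec_buildGematriaDictionary syllablelist (buildGematriaDictionary syllablelist)

-- ===== LEMMAS AND PROOFS =====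

theorem pv_lowerChar_idem (c : Char) :
    PySem.Chars.lowerChar (PySem.Chars.lowerChar c) = PySem.Chars.lowerChar c := by
  simp only [PySem.Chars.lowerChar, PySem.Chars.isupper]
  split_ifs with h1 h2 <;> try rfl
  exfalso
  simp only [Bool.and_eq_true, decide_eq_true_eq] at h1 h2
  rw [Char.le_def, Char.le_def] at h1
  rw [Char.le_def, Char.le_def] at h2
  have hle : c.toNat ≤ 90 := by exact_mod_cast h1.2
  have hv : (c.toNat + 32).isValidChar := Or.inl (by omega)
  have htn : (Char.ofNat (c.toNat + 32)).toNat = c.toNat + 32 := by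
    rw [Char.toNat_ofNat]; simp [hv]
  have h2' : (Char.ofNat (c.toNat + 32)).toNat ≤ 90 := by exact_mod_cast h2.2
  have hge : 65 ≤ c.toNat := by exact_mod_cast h1.1
  rw [htn] at h2'
  omega

-- B's closed-form letter value agrees with A's letter table on every character
-- get? of a literal dict whose keys all differ from c is none
theorem pv_get?_mk_not_mem (l : List (Char × Int)) (c : Char)
    (h : ∀ p ∈ l, p.1 ≠ c) : (PySem.Dict.mk l).get? c = none := by
  induction l with
  | nil => rfl
  | cons p t ih =>
      rw [PySem.Dict.get?_mk_cons, if_neg, ih (fun q hq => h q (by simp [hq]))]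
      simp only [beq_iff_eq]
      exact h p (by simp)

set_option maxHeartbeats 2000000 in
theorem pv_val_eq (c : Char) : pvVal c = pvGemValuesA.getD c 0 := by
  by_cases h : 97 ≤ c.toNat ∧ c.toNat ≤ 122
  · have hc : c = Char.ofNat c.toNat := (Char.ofNat_toNat c).symm
    obtain ⟨h1, h2⟩ := h
    interval_cases hn : c.toNat <;> (rw [hc]; decide)
  · -- not a lowercase letter: both sides are 0
    have hvz : pvVal c = 0 := by
      unfold pvVal
      rw [if_neg]
      intro ⟨hl, hr⟩
      omega
    have hgz : pvGemValuesA.getD c 0 = 0 := by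
      have hlit : pvGemValuesA = PySem.Dict.mk
        [('a',1),('b',2),('c',3),('d',4),('e',5),('f',6),('g',7),('h',8),
         ('i',9),('j',10),('k',20),('l',30),('m',40),('n',50),('o',60),
         ('p',70),('q',80),('r',90),('s',100),('t',200),('u',300),('v',400),
         ('w',500),('x',600),('y',700),('z',800)] := by rfl
      rw [hlit, PySem.Dict.getD_eq_get?_getD, pv_get?_mk_not_mem]
      · rfl
      · intro p hp he
        apply h
        fin_cases hp <;> (rw [← he]; decide)
    rw [hvz, hgz]

-- a sum accumulated by foldl over chars that are fixed points of lowerChar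
theorem pv_foldl_sum (m : List Char) (a : Int) (h : ∀ c ∈ m, PySem.Chars.lowerChar c = c) :
    m.foldl (fun value letter => value + pvGemValuesA.getD (PySem.Chars.lowerChar letter) 0) a
      = a + (m.map (fun c => pvGemValuesA.getD c 0)).sum := by
  induction m generalizing a with
  | nil => simp
  | cons c t ih =>
      have hc : PySem.Chars.lowerChar c = c := h c (by simp)
      simp only [List.foldl_cons, List.map_cons, List.sum_cons, hc]
      rw [ih _ (fun x hx => h x (by simp [hx]))]
      ring

-- the value A computes on an already-lowered syllable equals B's closed-form sum of that syllable
theorem pv_gem_eq (s : String) :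
    calculateGematria (PySem.Str.lower s) "English extended"
      = ((PySem.Str.lower s).toList.map pvVal).sum := by
  unfold calculateGematria
  rw [if_pos (by decide : (("English extended" == "English extended") = true)), PySem.Str.toList_lower]
  rw [pv_foldl_sum]
  · rw [zero_add]
    congr 1
    apply List.map_congr_left
    intro c _
    exact (pv_val_eq c).symm
  · intro c hc
    simp only [PySem.Chars.lower, List.mem_map] at hc
    obtain ⟨c0, _, rfl⟩ := hc
    exact pv_lowerChar_idem c0

-- A's branch (contains → append, else fresh singleton) is exactly one dict-modify step
theorem pv_branch (d : PySem.Dict Int (List String)) (g : Int) (v : String) :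
    (if d.contains g then d.modify g [] (fun l => l ++ [v]) else d.insert g [v])
      = d.modify g [] (fun l => l ++ [v]) := by
  by_cases h : d.contains g = true
  · rw [if_pos h]
  · rw [if_neg h, PySem.Dict.modify,
        PySem.Dict.getD_of_not_contains d [] (Bool.not_eq_true _ ▸ h), List.nil_append]

-- ===== VERDICT (by name: the statement is the Claim_ definition above) =====
theorem buildGematriaDictionary_spec : Claim_equal_buildGematriaDictionary := by
  intro l _
  unfold Spec_buildGematriaDictionary buildGematriaDictionary buildGematriaDictionary_alt
  set pf : String → Int × String := fun s =>
    (calculateGematria (PySem.Str.lower s) "English extended", PySem.Str.lower s) with hpf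
  set P : List (Int × String) := l.map pf with hP
  have hA : l.foldl (fun gematria_dict syllable0 =>
        let syllable := PySem.Str.lower syllable0
        let gematria := calculateGematria syllable "English extended"
        if gematria_dict.contains gematria then
          gematria_dict.modify gematria [] (fun l => l ++ [syllable])
        else gematria_dict.insert gematria [syllable]) PySem.Dict.empty
      = P.foldl (fun d p => d.modify p.1 [] (fun v => v ++ [p.2])) PySem.Dict.empty := by
    rw [hP, hpf, List.foldl_map]
    have hfun : (fun (gematria_dict : PySem.Dict Int (List String)) (syllable0 : String) =>
        let syllable := PySem.Str.lower syllable0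
        let gematria := calculateGematria syllable "English extended"
        if gematria_dict.contains gematria then
          gematria_dict.modify gematria [] (fun l => l ++ [syllable])
        else gematria_dict.insert gematria [syllable])
      = (fun (d : PySem.Dict Int (List String)) (s : String) =>
          d.modify (calculateGematria (PySem.Str.lower s) "English extended") []
            (fun v => v ++ [PySem.Str.lower s])) := by
      funext d s
      exact pv_branch d _ _
    rw [hfun]
  rw [hA]
  have hB : (l.map PySem.Str.lower).map
        (fun s => ((s.toList.map pvVal).sum, s)) = P := by
    rw [hP, hpf, List.map_map]
    apply List.map_congr_left
    intro s _
    simp only [Function.comp_apply, pv_gem_eq s]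
  simp only [hB]
  have hkeys : (P.foldl (fun d p => d.modify p.1 [] (fun v => v ++ [p.2]))
        PySem.Dict.empty).keys = PySem.List.dedup (P.map (fun p => p.1)) := by
    rw [PySem.Dict.keys_foldl_modify_key P Prod.fst [] (fun _ p v => v ++ [p.2]) PySem.Dict.empty,
        PySem.Dict.keys_empty, PySem.List.dedup_eq_ofList, PySem.Set.ofList_eq_foldl]
    rfl
  have hnd : (P.foldl (fun d p => d.modify p.1 [] (fun v => v ++ [p.2]))
        PySem.Dict.empty).keys.Nodup := by
    apply PySem.Dict.nodup_keys_foldl_modify_key P Prod.fst [] (fun _ p v => v ++ [p.2])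
    simp [PySem.Dict.keys_empty]
  rw [PySem.Dict.items_eq_map_keys _ hnd [], hkeys]
  apply List.map_congr_left
  intro k _
  rw [PySem.Dict.getD_foldl_modify_append P PySem.Dict.empty k, PySem.Dict.getD_empty]
  simp
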